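-- pv_equiv track=rewrite | github.com/KoushalParakala/Genomelab-Backend | app/services/mutation_engine.py | annotate_variant
-- ===== SOURCE A (Python) =====
-- def annotate_variant(wt_aa_seq: str, mut_aa_seq: str, is_frameshift: bool) -> str:
--     """
--     Categorizes the mutation impact (Requirement #3).
--     Labels: Synonymous, Missense, Nonsense, Frameshift.
--     """
--     if is_frameshift:
--         return "Frameshift"
--
--     # Same length check (silent/nonsense/missense)
--     if len(wt_aa_seq) != len(mut_aa_seq):
--         # In-frame indel
--         return "In-frame Indel"
--
--     differences = 0
--     nonsense = False
--
--     for wt_aa, mut_aa in zip(wt_aa_seq, mut_aa_seq):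
--         if wt_aa != mut_aa:
--             differences += 1
--             if mut_aa == '*' and wt_aa != '*':
--                 nonsense = True
--
--     if differences == 0:
--         return "Synonymous"
--     elif nonsense:
--         return "Nonsense"
--     else:
--         return "Missense"
-- ===== SOURCE B (Python) =====
-- def annotate_variant(wt_aa_seq: str, mut_aa_seq: str, is_frameshift: bool) -> str:
--     """Classify mutation impact via star-codon position sets instead of a zipped scan."""
--     if is_frameshift:
--         return "Frameshift"
--     if len(wt_aa_seq) != len(mut_aa_seq):
--         return "In-frame Indel"
--     if wt_aa_seq == mut_aa_seq:
--         return "Synonymous"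
--     wt_stars = {i for i, c in enumerate(wt_aa_seq) if c == '*'}
--     mut_stars = {i for i, c in enumerate(mut_aa_seq) if c == '*'}
--     if mut_stars - wt_stars:
--         return "Nonsense"
--     return "Missense"
-- ===== Notes on version B (the rewrite author's own statement) =====
-- stated objective: alternative
-- what changed: Replaces A's single zipped pass with a difference counter and a nonsense flag by a direct string-equality test for Synonymous and an index-set computation: the sets of stop-codon ('*') positions in each sequence are built independently and Nonsense is decided by a nonempty set difference mut_stars - wt_stars, with no character-by-character zip at all.
import Mathlib
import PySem

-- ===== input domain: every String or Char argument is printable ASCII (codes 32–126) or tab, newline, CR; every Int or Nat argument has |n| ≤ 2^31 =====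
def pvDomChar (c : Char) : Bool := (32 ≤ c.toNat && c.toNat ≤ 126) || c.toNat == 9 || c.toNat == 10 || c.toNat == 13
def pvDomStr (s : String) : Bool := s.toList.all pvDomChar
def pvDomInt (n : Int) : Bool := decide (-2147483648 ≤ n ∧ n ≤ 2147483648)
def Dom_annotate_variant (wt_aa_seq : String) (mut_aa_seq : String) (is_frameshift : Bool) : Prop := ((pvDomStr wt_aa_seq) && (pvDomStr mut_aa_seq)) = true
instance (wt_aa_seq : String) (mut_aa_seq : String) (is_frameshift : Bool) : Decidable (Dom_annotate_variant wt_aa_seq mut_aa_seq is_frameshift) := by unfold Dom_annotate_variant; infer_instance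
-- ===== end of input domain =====

-- B replaces A's single zipped counting pass by a string-equality test plus independently
-- built stop-codon index sets whose set difference decides Nonsense (alternative decomposition).

-- ===== PORT A =====
-- A's single loop over zip, maintaining (differences, nonsense)
def pvLoopA : List Char → List Char → Int → Bool → Int × Bool
  | w :: ws, m :: ms, d, n =>
      if w ≠ m then
        pvLoopA ws ms (d + 1) (if m = '*' ∧ w ≠ '*' then true else n)
      else
        pvLoopA ws ms d n
  | _, _, d, n => (d, n)

def annotate_variant (wt_aa_seq : String) (mut_aa_seq : String) (is_frameshift : Bool) : String :=
  if is_frameshift then "Frameshift"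
  else if PySem.Str.len wt_aa_seq ≠ PySem.Str.len mut_aa_seq then "In-frame Indel"
  else
    let r := pvLoopA wt_aa_seq.toList mut_aa_seq.toList 0 false
    if r.1 = 0 then "Synonymous"
    else if r.2 then "Nonsense"
    else "Missense"

-- ===== PORT B =====
-- {i for i, c in enumerate(s) if c == '*'}
def pvStars (s : String) : PySem.Set Int :=
  PySem.Set.ofList ((PySem.List.enumerate s.toList).filterMap
    (fun p => if p.2 = '*' then some p.1 else none))

def annotate_variant_alt (wt_aa_seq : String) (mut_aa_seq : String) (is_frameshift : Bool) : String :=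
  if is_frameshift then "Frameshift"
  else if PySem.Str.len wt_aa_seq ≠ PySem.Str.len mut_aa_seq then "In-frame Indel"
  else if wt_aa_seq = mut_aa_seq then "Synonymous"
  else if PySem.Set.diff (pvStars mut_aa_seq) (pvStars wt_aa_seq) ≠ [] then "Nonsense"
  else "Missense"

-- ===== PRECONDITION & SPEC =====
def Spec_annotate_variant (wt_aa_seq : String) (mut_aa_seq : String) (is_frameshift : Bool) (out : String) : Prop := out = annotate_variant_alt wt_aa_seq mut_aa_seq is_frameshift
instance (wt_aa_seq : String) (mut_aa_seq : String) (is_frameshift : Bool) (out : String) : Decidable (Spec_annotate_variant wt_aa_seq mut_aa_seq is_frameshift out) := by unfold Spec_annotate_variant; infer_instance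

-- ===== CLAIM (what is proved, stated in full; the proofs are below) =====
def Claim_equal_annotate_variant : Prop := ∀ (wt_aa_seq : String) (mut_aa_seq : String) (is_frameshift : Bool), Dom_annotate_variant wt_aa_seq mut_aa_seq is_frameshift → Spec_annotate_variant wt_aa_seq mut_aa_seq is_frameshift (annotate_variant wt_aa_seq mut_aa_seq is_frameshift)

-- ===== LEMMAS AND PROOFS =====

-- number of differing positions
def pvDiff : List Char → List Char → Int
  | w :: ws, m :: ms => (if w ≠ m then 1 else 0) + pvDiff ws ms
  | _, _ => 0

lemma pvDiff_nonneg : ∀ l1 l2, 0 ≤ pvDiff l1 l2 := by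
  intro l1
  induction l1 with
  | nil => intro l2; simp [pvDiff]
  | cons w ws ih =>
    intro l2
    cases l2 with
    | nil => simp [pvDiff]
    | cons m ms =>
      have := ih ms
      simp only [pvDiff]
      split <;> omega

lemma pvLoopA_fst : ∀ l1 l2 (d : Int) (n : Bool),
    (pvLoopA l1 l2 d n).1 = d + pvDiff l1 l2 := by
  intro l1
  induction l1 with
  | nil => intro l2 d n; cases l2 <;> simp [pvLoopA, pvDiff]
  | cons w ws ih =>
    intro l2 d n
    cases l2 with
    | nil => simp [pvLoopA, pvDiff]
    | cons m ms =>
      by_cases h : w = m <;> simp [pvLoopA, pvDiff, h, ih] <;> ring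

-- A's nonsense flag is an existence statement over positions
lemma pvLoopA_snd : ∀ l1 l2 (d : Int) (n : Bool),
    ((pvLoopA l1 l2 d n).2 = true ↔
      (n = true ∨ ∃ (k : Nat) (h1 : k < l1.length) (h2 : k < l2.length),
        l2[k] = '*' ∧ l1[k] ≠ '*')) := by
  intro l1
  induction l1 with
  | nil =>
    intro l2 d n
    cases l2 <;> simp [pvLoopA]
  | cons w ws ih =>
    intro l2 d n
    cases l2 with
    | nil => simp [pvLoopA]
    | cons m ms =>
      have hex : (∃ (k : Nat) (h1 : k < (w :: ws).length) (h2 : k < (m :: ms).length),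
            (m :: ms)[k] = '*' ∧ (w :: ws)[k] ≠ '*') ↔
          ((m = '*' ∧ w ≠ '*') ∨ ∃ (k : Nat) (h1 : k < ws.length) (h2 : k < ms.length),
            ms[k] = '*' ∧ ws[k] ≠ '*') := by
        constructor
        · rintro ⟨k, h1, h2, hm, hw⟩
          cases k with
          | zero => exact Or.inl ⟨by simpa using hm, by simpa using hw⟩
          | succ j =>
            exact Or.inr ⟨j, by simpa using h1, by simpa using h2,
              by simpa using hm, by simpa using hw⟩
        · rintro (⟨hm, hw⟩ | ⟨k, h1, h2, hm, hw⟩)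
          · exact ⟨0, by simp, by simp, by simpa, by simpa⟩
          · exact ⟨k + 1, by simpa using h1, by simpa using h2,
              by simpa using hm, by simpa using hw⟩
      by_cases h : w = m
      · subst h
        have hc : ¬ (w = '*' ∧ w ≠ '*') := by tauto
        rw [show pvLoopA (w :: ws) (w :: ms) d n = pvLoopA ws ms d n from by
          simp [pvLoopA]]
        rw [ih, hex]
        constructor
        · rintro (hn | he)
          · exact Or.inl hn
          · exact Or.inr (Or.inr he)
        · rintro (hn | (hc' | he))
          · exact Or.inl hn
          · exact absurd hc' hc
          · exact Or.inr he
      · by_cases hc : m = '*' ∧ w ≠ '*'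
        · rw [show pvLoopA (w :: ws) (m :: ms) d n = pvLoopA ws ms (d+1) true from by
            simp [pvLoopA, h, hc]]
          rw [ih, hex]
          tauto
        · rw [show pvLoopA (w :: ws) (m :: ms) d n = pvLoopA ws ms (d+1) n from by
            simp [pvLoopA, h, hc]]
          rw [ih, hex]
          tauto

lemma pvDiff_eq_zero_iff : ∀ l1 l2, l1.length = l2.length →
    (pvDiff l1 l2 = 0 ↔ l1 = l2) := by
  intro l1
  induction l1 with
  | nil =>
    intro l2 h
    cases l2 with
    | nil => simp [pvDiff]
    | cons m ms => simp at h
  | cons w ws ih =>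
    intro l2 h
    cases l2 with
    | nil => simp at h
    | cons m ms =>
      have hlen : ws.length = ms.length := by simpa using h
      have hnn := pvDiff_nonneg ws ms
      by_cases hwm : w = m
      · subst hwm
        simp only [pvDiff, if_neg (by tauto : ¬ w ≠ w)]
        constructor
        · intro h0
          have : pvDiff ws ms = 0 := by omega
          simp [(ih ms hlen).1 this]
        · intro he
          have : ws = ms := by simpa using he
          simpa using (ih ms hlen).2 this
      · simp only [pvDiff, if_pos (by tauto : w ≠ m)]
        constructor
        · intro h0; omega
        · intro he
          injection he with h1 h2
          exact absurd h1 hwm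

-- membership in a star-index set
lemma mem_pvStars (s : String) (i : Int) :
    i ∈ pvStars s ↔ ∃ (k : Nat) (h : k < s.toList.length), i = (k : Int) ∧ s.toList[k] = '*' := by
  unfold pvStars
  rw [PySem.Set.mem_ofList, List.mem_filterMap]
  constructor
  · rintro ⟨⟨j, c⟩, hmem, hif⟩
    rcases (PySem.List.mem_enumerate_iff _ _ _).1 hmem with ⟨k, hk, hp⟩
    by_cases hc : c = '*'
    · refine ⟨k, hk, ?_, ?_⟩
      · have : j = (0 : Int) + k ∧ c = s.toList[k] := by
          constructor <;> [exact congrArg Prod.fst hp; exact congrArg Prod.snd hp]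
        have hi : i = j := by simpa [hc] using hif.symm
        omega
      · have : c = s.toList[k] := congrArg Prod.snd hp
        rw [← this]; exact hc
    · simp [hc] at hif
  · rintro ⟨k, hk, hi, hs⟩
    refine ⟨((0 : Int) + k, s.toList[k]), ?_, ?_⟩
    · exact (PySem.List.mem_enumerate_iff _ _ _).2 ⟨k, hk, rfl⟩
    · simp [hs, hi]

-- the set difference is nonempty exactly when some position has an introduced stop codon
lemma diff_ne_nil_iff (wt mu : String) (hl : wt.toList.length = mu.toList.length) :
    (PySem.Set.diff (pvStars mu) (pvStars wt) ≠ []) ↔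
      (∃ (k : Nat) (h1 : k < wt.toList.length) (h2 : k < mu.toList.length),
        mu.toList[k] = '*' ∧ wt.toList[k] ≠ '*') := by
  constructor
  · intro hne
    rcases List.exists_mem_of_ne_nil _ hne with ⟨i, hi⟩
    rw [PySem.Set.mem_diff] at hi
    rcases (mem_pvStars mu i).1 hi.1 with ⟨k, hk, hik, hks⟩
    refine ⟨k, by omega, hk, hks, ?_⟩
    intro hw
    exact hi.2 ((mem_pvStars wt i).2 ⟨k, by omega, hik, hw⟩)
  · rintro ⟨k, h1, h2, hm, hw⟩
    intro hnil
    have hi : (k : Int) ∈ PySem.Set.diff (pvStars mu) (pvStars wt) := by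
      rw [PySem.Set.mem_diff]
      refine ⟨(mem_pvStars mu _).2 ⟨k, h2, rfl, hm⟩, ?_⟩
      intro hmem
      rcases (mem_pvStars wt _).1 hmem with ⟨k', hk', hkk, hs⟩
      have : k' = k := by omega
      subst this
      exact hw hs
    rw [hnil] at hi
    simp at hi

-- ===== VERDICT (by name: the statement is the Claim_ definition above) =====
theorem annotate_variant_spec : Claim_equal_annotate_variant := by
  intro wt mu fs _
  unfold Spec_annotate_variant annotate_variant annotate_variant_alt
  by_cases hfs : fs = true
  · simp [hfs]
  · simp only [hfs, Bool.false_eq_true, if_false]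
    by_cases hlen : PySem.Str.len wt ≠ PySem.Str.len mu
    · have hLne : wt.length ≠ mu.length := by
        simp only [PySem.Str.len_eq] at hlen
        exact_mod_cast hlen
      simp [hLne]
    · push_neg at hlen
      have hL : wt.length = mu.length := by
        simp only [PySem.Str.len_eq] at hlen
        exact_mod_cast hlen
      have hl : wt.toList.length = mu.toList.length := by
        simpa using hL
      have hfst := pvLoopA_fst wt.toList mu.toList 0 false
      have hsnd := pvLoopA_snd wt.toList mu.toList 0 false
      by_cases heq : wt = mu
      · subst heq
        have : pvDiff wt.toList wt.toList = 0 := (pvDiff_eq_zero_iff _ _ rfl).2 rfl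
        simp [hfst, hsnd, this]
      · have hne : wt.toList ≠ mu.toList := fun h => heq (String.toList_inj.1 h)
        have hdz : pvDiff wt.toList mu.toList ≠ 0 := by
          intro h0
          exact hne ((pvDiff_eq_zero_iff _ _ hl).1 h0)
        have hiff := diff_ne_nil_iff wt mu hl
        by_cases hscan : (pvLoopA wt.toList mu.toList 0 false).2 = true
        · have hex := (hsnd.1 hscan).resolve_left (by simp)
          have hdn : PySem.Set.diff (pvStars mu) (pvStars wt) ≠ [] := hiff.2 hex
          simp [hL, heq, hfst, hdz, hscan, hdn]
        · have hnex : ¬ ∃ (k : Nat) (h1 : k < wt.toList.length) (h2 : k < mu.toList.length),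
              mu.toList[k] = '*' ∧ wt.toList[k] ≠ '*' := by
            intro hex
            exact hscan (hsnd.2 (Or.inr hex))
          have hdn : ¬ PySem.Set.diff (pvStars mu) (pvStars wt) ≠ [] := fun h => hnex (hiff.1 h)
          simp only [ne_eq, not_not] at hdn
          simp [hL, heq, hfst, hdz, hscan, hdn]
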